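-- pv_equiv track=rewrite | github.com/omkar-334/agentic_rag | preprocessing.py | sort_text
-- ===== SOURCE A (Python) =====
-- def sort_text(chunks):
--     x_threshold = 300
--     left_column = []
--     right_column = []
--
--     for chunk in chunks:
--         if chunk["x"] < x_threshold:
--             left_column.append(chunk)
--         else:
--             right_column.append(chunk)
--
--     # Sort the chunks within each column based on the y-coordinate
--     left_column = sorted(left_column, key=lambda item: item["y"])
--     right_column = sorted(right_column, key=lambda item: item["y"])
--
--     sorted_text = left_column + right_column
--     return sorted_text
-- ===== SOURCE B (Python) =====
-- def sort_text(chunks):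
--     return sorted(chunks, key=lambda c: (0 if c["x"] < 300 else 1, c["y"]))
-- ===== Notes on version B (the rewrite author's own statement) =====
-- stated objective: simpler
-- what changed: Replaces the explicit partition loop and two separate per-column sorts with one stable sort of all chunks on the composite key (column indicator 0/1 for x<300, y).
import Mathlib
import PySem

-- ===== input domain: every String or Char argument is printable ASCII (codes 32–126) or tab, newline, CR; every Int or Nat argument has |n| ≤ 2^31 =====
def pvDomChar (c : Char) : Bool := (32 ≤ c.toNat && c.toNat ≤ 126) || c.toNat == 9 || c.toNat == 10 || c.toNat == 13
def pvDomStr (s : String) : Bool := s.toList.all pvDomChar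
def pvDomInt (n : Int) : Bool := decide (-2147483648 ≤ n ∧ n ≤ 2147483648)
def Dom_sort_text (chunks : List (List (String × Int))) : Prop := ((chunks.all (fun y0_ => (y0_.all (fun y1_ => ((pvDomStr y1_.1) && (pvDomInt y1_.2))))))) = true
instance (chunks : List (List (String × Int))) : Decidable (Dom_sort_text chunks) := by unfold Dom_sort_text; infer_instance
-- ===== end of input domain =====

-- B replaces A's partition loop plus two per-column sorts by ONE stable sort on the
-- composite key (column indicator, y); equal output on every input where A returns.

-- chunk["x"] / chunk["y"]: first-match dict lookup; the .getD 0 default is never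
-- reached inside Pre_sort_text (both keys present), where Python raises KeyError instead.
def pvGetX (c : List (String × Int)) : Int := (PySem.Dict.get? ⟨c⟩ "x").getD 0
def pvGetY (c : List (String × Int)) : Int := (PySem.Dict.get? ⟨c⟩ "y").getD 0

-- ===== PORT A =====
def sort_text (chunks : List (List (String × Int))) : List (List (String × Int)) :=
  -- x_threshold = 300; one for-loop appending each chunk to left_column or right_column
  let s := chunks.foldl
    (fun (s : List (List (String × Int)) × List (List (String × Int))) chunk =>
      if pvGetX chunk < 300 then (s.1 ++ [chunk], s.2) else (s.1, s.2 ++ [chunk]))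
    ([], [])
  -- sorted(left, key=y) + sorted(right, key=y)
  PySem.List.sorted s.1 (fun c => pvGetY c) ++ PySem.List.sorted s.2 (fun c => pvGetY c)

-- ===== PORT B =====
def sort_text_alt (chunks : List (List (String × Int))) : List (List (String × Int)) :=
  PySem.List.sorted2 chunks (fun c => if pvGetX c < 300 then (0 : Int) else 1) (fun c => pvGetY c)

-- ===== PRECONDITION & SPEC =====
-- Pre_ excludes exactly the chunks missing key "x" or "y", on which Python A raises KeyError.
def Pre_sort_text (chunks : List (List (String × Int))) : Prop :=
  (chunks.all (fun c => (PySem.Dict.get? ⟨c⟩ "x").isSome && (PySem.Dict.get? ⟨c⟩ "y").isSome)) = true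
instance (chunks : List (List (String × Int))) : Decidable (Pre_sort_text chunks) := by
  unfold Pre_sort_text; infer_instance
def pvWitness_sort_text : (List (List (String × Int))) :=
  [[("x", 10), ("y", 7)], [("x", 400), ("y", 1)], [("x", 5), ("y", 2)]]

def Spec_sort_text (chunks : List (List (String × Int))) (out : List (List (String × Int))) : Prop := out = sort_text_alt chunks
instance (chunks : List (List (String × Int))) (out : List (List (String × Int))) : Decidable (Spec_sort_text chunks out) := by unfold Spec_sort_text; infer_instance

-- ===== CLAIM (what is proved, stated in full; the proofs are below) =====
def Claim_equal_sort_text : Prop := ∀ (chunks : List (List (String × Int))), Dom_sort_text chunks → Pre_sort_text chunks → Spec_sort_text chunks (sort_text chunks)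

-- ===== LEMMAS AND PROOFS =====

-- comparator of sorted(·, key=y)
def pvLt2 (a b : List (String × Int)) : Bool := decide (pvGetY a < pvGetY b)
-- column indicator and the lexicographic comparator of sorted2
def pvK1 (c : List (String × Int)) : Int := if pvGetX c < 300 then (0 : Int) else 1
def pvLex (a b : List (String × Int)) : Bool :=
  decide (pvK1 a < pvK1 b) || !decide (pvK1 b < pvK1 a) && decide (pvGetY a < pvGetY b)

lemma pv_ins_left (x : List (String × Int)) (L R : List (List (String × Int)))
    (hx : pvGetX x < 300) (hL : ∀ y ∈ L, pvGetX y < 300) (hR : ∀ y ∈ R, ¬ pvGetX y < 300) :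
    PySem.List.insertBy pvLex x (L ++ R) = PySem.List.insertBy pvLt2 x L ++ R := by
  induction L with
  | nil =>
    cases R with
    | nil => rfl
    | cons r rs =>
      have hr := hR r (by simp)
      simp [PySem.List.insertBy, pvLex, pvK1, hx, hr]
  | cons y L ih =>
    have hy := hL y (by simp)
    have hlex : pvLex x y = pvLt2 x y := by simp [pvLex, pvLt2, pvK1, hx, hy]
    simp only [List.cons_append, PySem.List.insertBy, hlex]
    by_cases h : pvLt2 x y = true
    · simp [h]
    · simp only [Bool.not_eq_true] at h
      simp [h, ih (fun z hz => hL z (by simp [hz]))]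

lemma pv_ins_right0 (x : List (String × Int)) (R : List (List (String × Int)))
    (hx : ¬ pvGetX x < 300) (hR : ∀ y ∈ R, ¬ pvGetX y < 300) :
    PySem.List.insertBy pvLex x R = PySem.List.insertBy pvLt2 x R := by
  induction R with
  | nil => rfl
  | cons r rs ih =>
    have hr := hR r (by simp)
    have hlex : pvLex x r = pvLt2 x r := by
      simp [pvLex, pvLt2, pvK1, hx, hr]
    simp only [PySem.List.insertBy, hlex]
    by_cases h : pvLt2 x r = true
    · simp [h]
    · simp only [Bool.not_eq_true] at h
      simp [h, ih (fun z hz => hR z (by simp [hz]))]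

lemma pv_ins_right (x : List (String × Int)) (L R : List (List (String × Int)))
    (hx : ¬ pvGetX x < 300) (hL : ∀ y ∈ L, pvGetX y < 300) (hR : ∀ y ∈ R, ¬ pvGetX y < 300) :
    PySem.List.insertBy pvLex x (L ++ R) = L ++ PySem.List.insertBy pvLt2 x R := by
  induction L with
  | nil => simpa using pv_ins_right0 x R hx hR
  | cons y L ih =>
    have hy := hL y (by simp)
    have hlex : pvLex x y = false := by simp [pvLex, pvK1, hx, hy]
    simp only [List.cons_append, PySem.List.insertBy, hlex]
    simp [ih (fun z hz => hL z (by simp [hz]))]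

lemma pv_main (xs : List (List (String × Int))) (L R : List (List (String × Int)))
    (hL : ∀ y ∈ L, pvGetX y < 300) (hR : ∀ y ∈ R, ¬ pvGetX y < 300) :
    xs.foldl (fun acc x => PySem.List.insertBy pvLex x acc) (L ++ R)
      = (xs.filter (fun x => decide (pvGetX x < 300))).foldl
          (fun acc x => PySem.List.insertBy pvLt2 x acc) L
        ++ (xs.filter (fun x => !decide (pvGetX x < 300))).foldl
          (fun acc x => PySem.List.insertBy pvLt2 x acc) R := by
  induction xs generalizing L R with
  | nil => simp
  | cons x xs ih =>
    by_cases h : pvGetX x < 300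
    · have hL' : ∀ y ∈ PySem.List.insertBy pvLt2 x L, pvGetX y < 300 := by
        intro y hy
        rcases (PySem.List.mem_insertBy _ _ _ _).1 hy with rfl | hy
        · exact h
        · exact hL y hy
      simp only [List.foldl_cons, List.filter_cons, h, decide_true, Bool.not_true,
        pv_ins_left x L R h hL hR]
      simpa using ih (PySem.List.insertBy pvLt2 x L) R hL' hR
    · have hR' : ∀ y ∈ PySem.List.insertBy pvLt2 x R, ¬ pvGetX y < 300 := by
        intro y hy
        rcases (PySem.List.mem_insertBy _ _ _ _).1 hy with rfl | hy
        · exact h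
        · exact hR y hy
      simp only [List.foldl_cons, List.filter_cons, h, decide_false, Bool.not_false,
        pv_ins_right x L R h hL hR]
      simpa using ih L (PySem.List.insertBy pvLt2 x R) hL hR'

-- A's single loop with two accumulators is two filter loops
lemma pv_partition (chunks : List (List (String × Int))) :
    chunks.foldl
      (fun (s : List (List (String × Int)) × List (List (String × Int))) chunk =>
        if pvGetX chunk < 300 then (s.1 ++ [chunk], s.2) else (s.1, s.2 ++ [chunk]))
      ([], [])
      = (chunks.filter (fun x => decide (pvGetX x < 300)),
         chunks.filter (fun x => !decide (pvGetX x < 300))) := by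
  have hbody : (fun (s : List (List (String × Int)) × List (List (String × Int))) chunk =>
      if pvGetX chunk < 300 then (s.1 ++ [chunk], s.2) else (s.1, s.2 ++ [chunk]))
      = (fun s chunk =>
        ((if pvGetX chunk < 300 then s.1 ++ [chunk] else s.1),
         (if pvGetX chunk < 300 then s.2 else s.2 ++ [chunk]))) := by
    funext s c; split <;> rfl
  rw [hbody, PySem.List.foldl_prod_mk
    (f := fun acc chunk => if pvGetX chunk < 300 then acc ++ [chunk] else acc)
    (g := fun acc chunk => if pvGetX chunk < 300 then acc else acc ++ [chunk])]
  simp only [Prod.mk.injEq]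
  constructor
  · rw [PySem.List.foldl_append_ite_eq_filter]
    simp
  · have : (fun (acc : List (List (String × Int))) chunk =>
        if pvGetX chunk < 300 then acc else acc ++ [chunk])
        = (fun acc chunk => if ¬ pvGetX chunk < 300 then acc ++ [chunk] else acc) := by
      funext acc c
      by_cases h : pvGetX c < 300 <;> simp [h]
    rw [this, PySem.List.foldl_append_ite_eq_filter]
    simp only [List.nil_append]
    exact List.filter_congr fun x _ => by rw [← decide_not, decide_eq_decide]

-- ===== VERDICT (by name: the statement is the Claim_ definition above) =====
theorem sort_text_spec : Claim_equal_sort_text := by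
  intro chunks _ _
  unfold Spec_sort_text sort_text sort_text_alt
  simp only [pv_partition]
  have hA : ∀ (l : List (List (String × Int))),
      PySem.List.sorted l (fun c => pvGetY c) false
        = l.foldl (fun acc x => PySem.List.insertBy pvLt2 x acc) [] := by
    intro l
    simp only [PySem.List.sorted, if_neg (by decide : ¬ (false = true))]
    rfl
  have hB : PySem.List.sorted2 chunks (fun c => if pvGetX c < 300 then (0 : Int) else 1)
      (fun c => pvGetY c) false
      = chunks.foldl (fun acc x => PySem.List.insertBy pvLex x acc) [] := by
    simp only [PySem.List.sorted2, if_neg (by decide : ¬ (false = true))]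
    rfl
  rw [hA, hA, hB]
  simpa using (pv_main chunks [] [] (by simp) (by simp)).symm
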